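-- pv_equiv track=rewrite | github.com/oodetola/Obsidian | Exam/Reference Book/Pipeline/cyrus_clean_index.py | build_output
-- ===== SOURCE A (Python) =====
-- def format_refs(refs):
--     parts = []
--     for book in sorted(refs.keys()):
--         pages = refs[book]
--         page_str = " ".join(str(p) for p in pages)
--         parts.append(f"(B{book}) {page_str}")
--     return ", ".join(parts)
--
-- def build_output(entries, code_entries):
--     lines = []
--     lines.append("=" * 80)
--     lines.append("SEC549 CLEAN INDEX -- Prepared by Cyrus (v3 - Dictionary Enhanced)")
--     lines.append("GIAC Exam Reference -- Alphabetical Lookup")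
--     lines.append("Format: term > (Book#) page numbers")
--     lines.append("=" * 80)
--     lines.append("")
--
--     # Separate alpha vs non-alpha
--     alpha_entries = {t: r for t, r in entries.items() if t and t[0].isalpha()}
--     other_entries = {t: r for t, r in entries.items() if t and not t[0].isalpha()}
--
--     if other_entries:
--         lines.append("\n-- # " + "-" * 74)
--         for term in sorted(other_entries.keys()):
--             ref_str = format_refs(other_entries[term])
--             lines.append(f"  {term} > {ref_str}")
--
--     current_letter = ""
--     for term in sorted(alpha_entries.keys(), key=str.lower):
--         first_char = term[0].upper()
--         if first_char != current_letter:
--             current_letter = first_char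
--             lines.append(f"\n-- {current_letter} " + "-" * 74)
--         ref_str = format_refs(alpha_entries[term])
--         lines.append(f"  {term} > {ref_str}")
--
--     if code_entries:
--         lines.append(f"\n\n{'=' * 80}")
--         lines.append("CODE & PATH REFERENCES")
--         lines.append("=" * 80)
--         lines.append("")
--         for term in sorted(code_entries.keys()):
--             ref_str = format_refs(code_entries[term])
--             lines.append(f"  {term} > {ref_str}")
--
--     return "\n".join(lines)
-- ===== SOURCE B (Python) =====
-- def format_refs(refs):
--     return ", ".join(
--         "(B{}) {}".format(book, " ".join(str(p) for p in pages))
--         for book, pages in sorted(refs.items(), key=lambda br: br[0])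
--     )
--
-- def _entry_line(term, refs):
--     return "  {} > {}".format(term, format_refs(refs))
--
-- def build_output(entries, code_entries):
--     out = [
--         "=" * 80,
--         "SEC549 CLEAN INDEX -- Prepared by Cyrus (v3 - Dictionary Enhanced)",
--         "GIAC Exam Reference -- Alphabetical Lookup",
--         "Format: term > (Book#) page numbers",
--         "=" * 80,
--         "",
--     ]
--     named = [(t, r) for t, r in entries.items() if t]
--
--     other = sorted(((t, r) for t, r in named if not t[0].isalpha()),
--                    key=lambda tr: tr[0])
--     if other:
--         out.append("\n-- # " + "-" * 74)
--         out.extend(_entry_line(t, r) for t, r in other)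
--
--     alpha = sorted(((t, r) for t, r in named if t[0].isalpha()),
--                    key=lambda tr: tr[0].lower())
--     for letter in "ABCDEFGHIJKLMNOPQRSTUVWXYZ":
--         block = [(t, r) for t, r in alpha if t[0].upper() == letter]
--         if block:
--             out.append("\n-- {} ".format(letter) + "-" * 74)
--             out.extend(_entry_line(t, r) for t, r in block)
--
--     if code_entries:
--         out.append("\n\n" + "=" * 80)
--         out.append("CODE & PATH REFERENCES")
--         out.append("=" * 80)
--         out.append("")
--         out.extend(_entry_line(t, r)
--                    for t, r in sorted(code_entries.items(), key=lambda tr: tr[0]))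
--
--     return "\n".join(out)
-- ===== Notes on version B (the rewrite author's own statement) =====
-- stated objective: alternative
-- what changed: The alphabetical section is produced by an outer loop over the letters A-Z that filters out each letter's block (divider emitted once per non-empty block), replacing A's stateful single scan with a current_letter sentinel; sections are built as lists concatenated at the end, and format_refs becomes a join over sorted items instead of a parts-accumulating loop with key lookups.
import Mathlib
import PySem

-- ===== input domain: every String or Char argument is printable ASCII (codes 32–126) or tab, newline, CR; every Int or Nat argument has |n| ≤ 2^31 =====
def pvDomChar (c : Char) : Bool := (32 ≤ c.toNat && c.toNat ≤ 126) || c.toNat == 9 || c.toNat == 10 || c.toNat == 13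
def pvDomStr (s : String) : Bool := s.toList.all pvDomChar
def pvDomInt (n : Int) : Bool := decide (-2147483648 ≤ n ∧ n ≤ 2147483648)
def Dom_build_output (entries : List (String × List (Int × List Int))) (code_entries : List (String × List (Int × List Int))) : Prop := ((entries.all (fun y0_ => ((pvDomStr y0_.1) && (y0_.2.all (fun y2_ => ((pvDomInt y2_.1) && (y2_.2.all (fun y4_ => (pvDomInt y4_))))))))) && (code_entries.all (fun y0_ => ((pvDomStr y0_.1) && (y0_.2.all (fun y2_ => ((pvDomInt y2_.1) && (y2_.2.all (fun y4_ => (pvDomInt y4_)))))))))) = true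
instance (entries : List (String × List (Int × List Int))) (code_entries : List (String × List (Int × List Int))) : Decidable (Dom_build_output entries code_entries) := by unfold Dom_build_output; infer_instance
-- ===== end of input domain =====

-- B replaces A's stateful current_letter scan of the alphabetical section by an outer loop
-- over the letters A–Z that emits each letter's filtered block, and builds each section as a
-- mapped list instead of an appending loop with dict lookups (objective: alternative).
-- The dict arguments are modelled as association lists; Pre_ restricts to duplicate-free keys,
-- the only lists that denote Python dicts.

-- ===== PORT A =====
-- t and t[0].isalpha()  (t[0] via pyGet?; the none branch is unreachable because of the `t and`)
def pvAlphaHeadA (t : String) : Bool := ((PySem.Str.pyGet? t 0).map PySem.Chars.isalpha).getD false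

def pvFormatRefsA (refs : List (Int × List Int)) : String :=
  let parts : List String := []
  let parts := (PySem.List.sorted (refs.map (fun p => p.1)) (fun b => b)).foldl
    (fun parts book =>
      let pages := (PySem.Dict.mk refs).getD book []   -- refs[book]; book comes from refs.keys()
      let page_str := PySem.Str.join " " (pages.map (fun p => PySem.Int.toStr p))
      parts ++ ["(B" ++ PySem.Int.toStr book ++ ") " ++ page_str]) parts
  PySem.Str.join ", " parts

def build_output (entries : List (String × List (Int × List Int))) (code_entries : List (String × List (Int × List Int))) : String :=
  let lines : List String := []
  let lines := lines ++ [String.ofList (List.replicate 80 '=')]      -- "=" * 80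
  let lines := lines ++ ["SEC549 CLEAN INDEX -- Prepared by Cyrus (v3 - Dictionary Enhanced)"]
  let lines := lines ++ ["GIAC Exam Reference -- Alphabetical Lookup"]
  let lines := lines ++ ["Format: term > (Book#) page numbers"]
  let lines := lines ++ [String.ofList (List.replicate 80 '=')]
  let lines := lines ++ [""]
  let alpha_entries := PySem.Dict.ofList (entries.filter (fun p => p.1 != "" && pvAlphaHeadA p.1))
  let other_entries := PySem.Dict.ofList (entries.filter (fun p => p.1 != "" && !pvAlphaHeadA p.1))
  let lines := if other_entries.size != 0 then
      (PySem.List.sorted other_entries.keys (fun t => t)).foldl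
        (fun lines term =>
          let ref_str := pvFormatRefsA (other_entries.getD term [])
          lines ++ ["  " ++ term ++ " > " ++ ref_str])
        (lines ++ ["\n-- # " ++ String.ofList (List.replicate 74 '-')])
    else lines
  let st := (PySem.List.sorted alpha_entries.keys (fun t => PySem.Str.lower t)).foldl
    (fun (st : String × List String) term =>
      -- first_char = term[0].upper(); term[0] via pyGet? (nonempty by construction)
      let first_char := PySem.Str.upper (String.ofList (PySem.Str.pyGet? term 0).toList)
      let st := if first_char != st.1 then
          (first_char, st.2 ++ ["\n-- " ++ first_char ++ " " ++ String.ofList (List.replicate 74 '-')])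
        else st
      (st.1, st.2 ++ ["  " ++ term ++ " > " ++ pvFormatRefsA (alpha_entries.getD term [])]))
    ("", lines)
  let lines := st.2
  let lines := if code_entries.length != 0 then
      (PySem.List.sorted (code_entries.map (fun p => p.1)) (fun t => t)).foldl
        (fun lines term =>
          let ref_str := pvFormatRefsA ((PySem.Dict.mk code_entries).getD term [])
          lines ++ ["  " ++ term ++ " > " ++ ref_str])
        (lines ++ ["\n\n" ++ String.ofList (List.replicate 80 '='), "CODE & PATH REFERENCES",
                   String.ofList (List.replicate 80 '='), ""])
    else lines
  PySem.Str.join "\n" lines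

-- ===== PORT B =====
def pvFormatRefsB (refs : List (Int × List Int)) : String :=
  PySem.Str.join ", " ((PySem.List.sorted refs (fun br => br.1)).map
    (fun br => "(B" ++ PySem.Int.toStr br.1 ++ ") " ++ PySem.Str.join " " (br.2.map (fun p => PySem.Int.toStr p))))

def pvEntryLineB (t : String) (r : List (Int × List Int)) : String :=
  "  " ++ t ++ " > " ++ pvFormatRefsB r

-- t[0].upper() as a one-character string (t[0] via pyGet?; callers pass nonempty t)
def pvFirstUpperB (t : String) : String :=
  PySem.Str.upper (String.ofList (PySem.Str.pyGet? t 0).toList)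

def build_output_alt (entries : List (String × List (Int × List Int))) (code_entries : List (String × List (Int × List Int))) : String :=
  let out : List String :=
    [String.ofList (List.replicate 80 '='),
     "SEC549 CLEAN INDEX -- Prepared by Cyrus (v3 - Dictionary Enhanced)",
     "GIAC Exam Reference -- Alphabetical Lookup",
     "Format: term > (Book#) page numbers",
     String.ofList (List.replicate 80 '='),
     ""]
  let named := entries.filter (fun p => p.1 != "")
  let other := PySem.List.sorted (named.filter (fun p => !pvAlphaHeadA p.1)) (fun p => p.1)
  let out := if !other.isEmpty then
      (out ++ ["\n-- # " ++ String.ofList (List.replicate 74 '-')]) ++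
        other.map (fun p => pvEntryLineB p.1 p.2)
    else out
  let alpha := PySem.List.sorted (named.filter (fun p => pvAlphaHeadA p.1)) (fun p => PySem.Str.lower p.1)
  -- for letter in "ABCDEFGHIJKLMNOPQRSTUVWXYZ" (each letter a one-character string)
  let out := ("ABCDEFGHIJKLMNOPQRSTUVWXYZ").toList.foldl
    (fun out c =>
      let block := alpha.filter (fun p => pvFirstUpperB p.1 == String.ofList [c])
      if !block.isEmpty then
        (out ++ ["\n-- " ++ String.ofList [c] ++ " " ++ String.ofList (List.replicate 74 '-')]) ++
          block.map (fun p => pvEntryLineB p.1 p.2)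
      else out) out
  let out := if !code_entries.isEmpty then
      (out ++ ["\n\n" ++ String.ofList (List.replicate 80 '='), "CODE & PATH REFERENCES",
               String.ofList (List.replicate 80 '='), ""]) ++
        (PySem.List.sorted code_entries (fun p => p.1)).map (fun p => pvEntryLineB p.1 p.2)
    else out
  PySem.Str.join "\n" out

-- ===== PRECONDITION & SPEC =====
-- Pre_ excludes association lists with duplicate keys (at the term level or inside a refs dict);
-- such lists do not arise from Python dict arguments, whose keys are unique.
def Pre_build_output (entries : List (String × List (Int × List Int))) (code_entries : List (String × List (Int × List Int))) : Prop :=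
  (entries.map (fun p => p.1)).Nodup ∧ (code_entries.map (fun p => p.1)).Nodup ∧
  (∀ p ∈ entries, (p.2.map (fun q => q.1)).Nodup) ∧ (∀ p ∈ code_entries, (p.2.map (fun q => q.1)).Nodup)
instance (entries : List (String × List (Int × List Int))) (code_entries : List (String × List (Int × List Int))) : Decidable (Pre_build_output entries code_entries) := by unfold Pre_build_output; infer_instance

def pvWitness_build_output : (List (String × List (Int × List Int))) × (List (String × List (Int × List Int))) :=
  ([("apple", [(1, [2, 3])]), ("7zip", [(2, [4])])], [("/etc", [(1, [5])])])

def Spec_build_output (entries : List (String × List (Int × List Int))) (code_entries : List (String × List (Int × List Int))) (out : String) : Prop := out = build_output_alt entries code_entries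
instance (entries : List (String × List (Int × List Int))) (code_entries : List (String × List (Int × List Int))) (out : String) : Decidable (Spec_build_output entries code_entries out) := by unfold Spec_build_output; infer_instance

-- ===== CLAIM (what is proved, stated in full; the proofs are below) =====
def Claim_equal_build_output : Prop := ∀ (entries : List (String × List (Int × List Int))) (code_entries : List (String × List (Int × List Int))), Dom_build_output entries code_entries → Pre_build_output entries code_entries → Spec_build_output entries code_entries (build_output entries code_entries)

-- ===== LEMMAS AND PROOFS =====

theorem pv_insertBy_map {α β : Type} (f : α → β) (ble : β → β → Bool) (x : α) (ys : List α) :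
    PySem.List.insertBy ble (f x) (ys.map f) =
      (PySem.List.insertBy (fun a b => ble (f a) (f b)) x ys).map f := by
  induction ys with
  | nil => simp [PySem.List.insertBy]
  | cons y ys ih =>
    simp only [List.map_cons, PySem.List.insertBy]
    by_cases h : ble (f x) (f y) = true
    · simp [h]
    · simp [h, ih]

theorem pv_sorted_map_comm {α β κ : Type} [LT κ] [DecidableLT κ] (f : α → β) (key : β → κ) (l : List α) :
    PySem.List.sorted (l.map f) key = (PySem.List.sorted l (fun a => key (f a))).map f := by
  rw [PySem.List.sorted_eq_foldl_insertBy, PySem.List.sorted_eq_foldl_insertBy, List.foldl_map]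
  suffices h : ∀ (acc : List α), List.foldl (fun acc x => PySem.List.insertBy (fun a b => decide (key a < key b)) (f x) acc) (acc.map f) l = (List.foldl (fun acc x => PySem.List.insertBy (fun a b => decide (key (f a) < key (f b))) x acc) acc l).map f by
    simpa using h []
  induction l with
  | nil => intro acc; simp
  | cons x xs ih =>
    intro acc
    simp only [List.foldl_cons, pv_insertBy_map f (fun a b => decide (key a < key b)) x acc]
    exact ih _

theorem pv_items_ofList {κ ν : Type} [BEq κ] [LawfulBEq κ] (l : List (κ × ν))
    (h : (l.map (fun p => p.1)).Nodup) : (PySem.Dict.ofList l).items = l := by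
  have := PySem.Dict.items_foldl_insert_fresh l (fun p => p.1) (fun p => p.2) PySem.Dict.empty
    (by intro a _; simp [PySem.Dict.contains_empty]) h
  simpa [PySem.Dict.ofList, PySem.Dict.update] using this

theorem pv_getD_mk {κ ν : Type} [BEq κ] [LawfulBEq κ] (l : List (κ × ν)) (p : κ × ν)
    (hmem : p ∈ l) (h : (l.map (fun q => q.1)).Nodup) (d0 : ν) :
    (PySem.Dict.mk l).getD p.1 d0 = p.2 := by
  exact PySem.Dict.getD_of_mem_items (PySem.Dict.mk l) (k := p.1) (v := p.2) hmem h d0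

theorem pv_map_sorted_keys {α ν κ τ : Type} [BEq α] [LawfulBEq α] [LT κ] [DecidableLT κ]
    (l : List (α × ν)) (key : α → κ) (f : α → ν → τ) (d0 : ν)
    (h : (l.map (fun p => p.1)).Nodup) :
    (PySem.List.sorted (l.map (fun p => p.1)) (fun t => key t)).map
        (fun t => f t ((PySem.Dict.mk l).getD t d0)) =
      (PySem.List.sorted l (fun p => key p.1)).map (fun p => f p.1 p.2) := by
  rw [pv_sorted_map_comm (fun p => p.1) key l, List.map_map]
  refine List.map_congr_left ?_
  intro p hp
  rw [PySem.List.mem_sorted] at hp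
  simp only [Function.comp]
  rw [pv_getD_mk l p hp h d0]

theorem pv_format_refs_eq (refs : List (Int × List Int)) (h : (refs.map (fun q => q.1)).Nodup) :
    pvFormatRefsA refs = pvFormatRefsB refs := by
  unfold pvFormatRefsA pvFormatRefsB
  dsimp only
  rw [PySem.List.foldl_append_singleton_eq_map, List.nil_append]
  rw [pv_map_sorted_keys refs (fun b => b)
    (fun book pages => "(B" ++ PySem.Int.toStr book ++ ") " ++ PySem.Str.join " " (pages.map (fun p => PySem.Int.toStr p))) [] h]


-- ---- character-level facts ----

theorem pv_alpha_toNat_lt (c : Char) (h : PySem.Chars.isalpha c = true) : c.toNat < 123 := by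
  simp only [PySem.Chars.isalpha, PySem.Chars.isupper, PySem.Chars.islower, Bool.or_eq_true,
    Bool.and_eq_true, decide_eq_true_eq] at h
  rcases h with ⟨-, h⟩ | ⟨-, h⟩ <;> rw [Char.le_def, UInt32.le_iff_toNat_le] at h
  · have hz : ('Z').val.toNat = 90 := rfl
    have he : c.toNat = c.val.toNat := rfl
    rw [hz] at h; omega
  · have hz : ('z').val.toNat = 122 := rfl
    have he : c.toNat = c.val.toNat := rfl
    rw [hz] at h; omega

set_option maxRecDepth 10000 in
theorem pv_upper_mem_aux : ∀ x : Fin 123, PySem.Chars.isalpha (Char.ofNat x.val) = true →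
    PySem.Chars.upperChar (Char.ofNat x.val) ∈ ("ABCDEFGHIJKLMNOPQRSTUVWXYZ").toList := by decide

theorem pv_upper_mem (c : Char) (h : PySem.Chars.isalpha c = true) :
    PySem.Chars.upperChar c ∈ ("ABCDEFGHIJKLMNOPQRSTUVWXYZ").toList := by
  have hx := pv_upper_mem_aux ⟨c.toNat, pv_alpha_toNat_lt c h⟩
  rw [Char.ofNat_toNat] at hx
  exact hx h

set_option maxHeartbeats 1000000 in
set_option maxRecDepth 10000 in
theorem pv_upper_mono_aux : ∀ x y : Fin 123,
    PySem.Chars.isalpha (Char.ofNat x.val) = true → PySem.Chars.isalpha (Char.ofNat y.val) = true →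
    PySem.Chars.lowerChar (Char.ofNat x.val) ≤ PySem.Chars.lowerChar (Char.ofNat y.val) →
    PySem.Chars.upperChar (Char.ofNat x.val) ≤ PySem.Chars.upperChar (Char.ofNat y.val) := by decide

theorem pv_upper_mono (a b : Char) (ha : PySem.Chars.isalpha a = true) (hb : PySem.Chars.isalpha b = true)
    (h : PySem.Chars.lowerChar a ≤ PySem.Chars.lowerChar b) :
    PySem.Chars.upperChar a ≤ PySem.Chars.upperChar b := by
  have hx := pv_upper_mono_aux ⟨a.toNat, pv_alpha_toNat_lt a ha⟩ ⟨b.toNat, pv_alpha_toNat_lt b hb⟩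
  rw [Char.ofNat_toNat, Char.ofNat_toNat] at hx
  exact hx ha hb h

-- ---- single-character-string facts ----

theorem pv_str_ext {s t : String} (h : s.toList = t.toList) : s = t := by
  have h1 := congrArg String.ofList h
  rwa [String.ofList_toList, String.ofList_toList] at h1

theorem pv_ofList_single_inj {a b : Char} (h : String.ofList [a] = String.ofList [b]) : a = b := by
  have h2 := congrArg String.toList h
  simpa using h2

theorem pv_empty_ne_single (c : Char) : ("" : String) ≠ String.ofList [c] := by
  intro h
  have h2 := congrArg String.toList h
  simp at h2

-- the head-related characterisations of the filtered terms
def pvKC (t : String) : Char := PySem.Chars.upperChar (t.toList.headD 'A')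

theorem pv_alpha_head (t : String) (h : (t != "" && pvAlphaHeadA t) = true) :
    ∃ c cs, t.toList = c :: cs ∧ PySem.Chars.isalpha c = true := by
  rw [Bool.and_eq_true] at h
  rcases h with ⟨hne, hal⟩
  rcases ht : t.toList with _ | ⟨c, cs⟩
  · exfalso
    apply (bne_iff_ne).mp hne
    exact pv_str_ext (by simp [ht])
  · refine ⟨c, cs, rfl, ?_⟩
    unfold pvAlphaHeadA at hal
    rw [show (0:Int) = ((0:Nat):Int) from rfl, PySem.Str.pyGet?_natCast] at hal
    simpa [ht] using hal

theorem pv_firstUpper_eq (t : String) (c : Char) (cs : List Char) (ht : t.toList = c :: cs) :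
    PySem.Str.upper (String.ofList (PySem.Str.pyGet? t 0).toList) =
      String.ofList [PySem.Chars.upperChar c] ∧ pvKC t = PySem.Chars.upperChar c := by
  constructor
  · apply pv_str_ext
    rw [PySem.Str.toList_upper]
    rw [show (0:Int) = ((0:Nat):Int) from rfl, PySem.Str.pyGet?_natCast]
    simp [ht, PySem.Chars.upper]
  · unfold pvKC
    rw [ht]
    rfl


theorem pv_lower_head_le (s t : String) (a b : Char) (asv : List Char) (bs : List Char)
    (hs : s.toList = a :: asv) (ht : t.toList = b :: bs)
    (h : PySem.Str.lower s ≤ PySem.Str.lower t) :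
    PySem.Chars.lowerChar a ≤ PySem.Chars.lowerChar b := by
  rcases lt_or_eq_of_le h with hlt | heq
  · have hlt2 := String.lt_iff_toList_lt.mp hlt
    rw [PySem.Str.toList_lower, PySem.Str.toList_lower] at hlt2
    unfold PySem.Chars.lower at hlt2
    rw [hs, ht] at hlt2
    simp only [List.map_cons] at hlt2
    exact List.head_le_of_lt hlt2
  · have h2 := congrArg String.toList heq
    rw [PySem.Str.toList_lower, PySem.Str.toList_lower] at h2
    unfold PySem.Chars.lower at h2
    rw [hs, ht] at h2
    simp only [List.map_cons, List.cons.injEq] at h2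
    exact le_of_eq h2.1

-- ---- generic sentinel-scan / per-letter-blocks machinery ----

def pvEmitG (k f dv : String → String) : String → List String → List String
  | _, [] => []
  | cur, t :: ts => (if k t != cur then [dv t] else []) ++ ([f t] ++ pvEmitG k f dv (k t) ts)

def pvBlocksG (k f : String → String) (D : String) (L : List String) : List Char → List String
  | [] => []
  | c :: cs =>
      (if (L.filter (fun t => k t == String.ofList [c])).isEmpty then []
       else ("\n-- " ++ String.ofList [c] ++ " " ++ D) ::
         (L.filter (fun t => k t == String.ofList [c])).map f) ++ pvBlocksG k f D L cs

theorem pv_scan (k f dv : String → String) (L : List String) : ∀ (cur : String) (acc : List String),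
    (List.foldl (fun (st : String × List String) term =>
        ((if k term != st.1 then (k term, st.2 ++ [dv term]) else st).1,
         (if k term != st.1 then (k term, st.2 ++ [dv term]) else st).2 ++ [f term]))
      (cur, acc) L).2 = acc ++ pvEmitG k f dv cur L := by
  induction L with
  | nil => intro cur acc; simp [pvEmitG]
  | cons t ts ih =>
    intro cur acc
    simp only [List.foldl_cons, pvEmitG]
    by_cases h : k t = cur
    · simp only [h, bne_self_eq_false, Bool.false_eq_true, if_false, List.nil_append]
      rw [ih cur (acc ++ [f t])]
      simp [List.append_assoc]
    · have hb : (k t != cur) = true := bne_iff_ne.mpr h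
      simp only [hb, if_pos]
      rw [ih (k t) ((acc ++ [dv t]) ++ [f t])]
      simp [List.append_assoc]

theorem pv_emit_run (k f dv : String → String) :
    ∀ (A B : List String) (cur : String), (∀ t ∈ A, k t = cur) →
      pvEmitG k f dv cur (A ++ B) = A.map f ++ pvEmitG k f dv cur B := by
  intro A
  induction A with
  | nil => intro B cur _; simp
  | cons t ts ih =>
    intro B cur hA
    have ht : k t = cur := hA t (by simp)
    simp only [List.cons_append, pvEmitG, ht, bne_self_eq_false, Bool.false_eq_true,
      List.nil_append, List.map_cons]
    rw [ih B cur (fun u hu => hA u (by simp [hu]))]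
    simp

theorem pv_blocks_congr (k f : String → String) (D : String) :
    ∀ (cs : List Char) (L L' : List String),
      (∀ c ∈ cs, L.filter (fun t => k t == String.ofList [c]) = L'.filter (fun t => k t == String.ofList [c])) →
      pvBlocksG k f D L cs = pvBlocksG k f D L' cs := by
  intro cs
  induction cs with
  | nil => intro L L' _; rfl
  | cons c cs ih =>
    intro L L' h
    simp only [pvBlocksG]
    rw [h c (by simp), ih L L' (fun c' hc' => h c' (by simp [hc']))]

theorem pv_emit_blocks (k f : String → String) (D : String) (kc : String → Char) :
    ∀ (cs : List Char) (L : List String) (cur : String),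
      (∀ t ∈ L, k t = String.ofList [kc t]) →
      (∀ t ∈ L, kc t ∈ cs) →
      L.Pairwise (fun a b => kc a ≤ kc b) →
      cs.Pairwise (· < ·) →
      (∀ c ∈ cs, cur ≠ String.ofList [c]) →
      pvEmitG k f (fun t => "\n-- " ++ k t ++ " " ++ D) cur L = pvBlocksG k f D L cs := by
  intro cs
  induction cs with
  | nil =>
    intro L cur hk hmem _ _ _
    cases L with
    | nil => rfl
    | cons t ts => exact absurd (hmem t (by simp)) (by simp)
  | cons c cs ih =>
    intro L cur hk hmem hmono hcs hcur
    have hfe : ∀ t ∈ L, ∀ c' : Char, (k t == String.ofList [c']) = (kc t == c') := by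
      intro t ht c'
      rw [hk t ht]
      by_cases h : kc t = c'
      · simp [h]
      · rw [beq_eq_false_iff_ne.mpr h, beq_eq_false_iff_ne.mpr (fun hh => h (pv_ofList_single_inj hh))]
    have hsplit : L = L.takeWhile (fun t => kc t == c) ++ L.dropWhile (fun t => kc t == c) :=
      (List.takeWhile_append_dropWhile).symm
    set A := L.takeWhile (fun t => kc t == c) with hAdef
    set B := L.dropWhile (fun t => kc t == c) with hBdef
    have hAsub : A.Sublist L := by rw [hAdef]; exact List.takeWhile_sublist _
    have hBsub : B.Sublist L := by rw [hBdef]; exact List.dropWhile_sublist _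
    have hA : ∀ t ∈ A, kc t = c := by
      intro t ht
      have := List.mem_takeWhile_imp ht
      simpa using this
    have hB : ∀ t ∈ B, kc t ≠ c ∧ kc t ∈ cs := by
      have hcl : ∀ c' ∈ cs, c < c' := (List.pairwise_cons.mp hcs).1
      cases hBc : B with
      | nil => intro t ht; simp at ht
      | cons b bs =>
        have hbfalse : (fun t => kc t == c) b = false := by
          have h2 := List.head_dropWhile_not (fun t => kc t == c) (l := L) (by rw [← hBdef, hBc]; simp)
          simp only [← hBdef, hBc, List.head_cons] at h2
          exact h2
        have hbne : kc b ≠ c := by simpa using hbfalse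
        have hbmem : kc b ∈ cs := by
          have := hmem b (hBsub.mem (by rw [hBc]; simp))
          simp only [List.mem_cons] at this
          tauto
        have hblt : c < kc b := hcl _ hbmem
        intro t ht
        have htB : t ∈ B := by rw [hBc]; exact ht
        rcases List.mem_cons.mp ht with rfl | htbs
        · exact ⟨hbne, hbmem⟩
        · have hPB : B.Pairwise (fun a b => kc a ≤ kc b) := hmono.sublist hBsub
          rw [hBc] at hPB
          have hle : kc b ≤ kc t := (List.pairwise_cons.mp hPB).1 t htbs
          have hlt : c < kc t := lt_of_lt_of_le hblt hle
          constructor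
          · exact fun hh => by rw [hh] at hlt; exact lt_irrefl _ hlt
          · have := hmem t (hBsub.mem htB)
            simp only [List.mem_cons] at this
            rcases this with h1 | h2
            · exact absurd h1 (by intro hh; rw [hh] at hlt; exact lt_irrefl _ hlt)
            · exact h2
    have hfilterc : L.filter (fun t => k t == String.ofList [c]) = A := by
      rw [List.filter_congr (fun t ht => hfe t ht c)]
      conv_lhs => rw [hsplit]
      rw [List.filter_append, List.filter_eq_self.mpr (fun t ht => by simpa using hA t ht),
        List.filter_eq_nil_iff.mpr (fun t ht => by simpa using (hB t ht).1), List.append_nil]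
    have hfilterrest : ∀ c' ∈ cs,
        L.filter (fun t => k t == String.ofList [c']) = B.filter (fun t => k t == String.ofList [c']) := by
      intro c' hc'
      have hcne : c ≠ c' := fun hh => by
        have := (List.pairwise_cons.mp hcs).1 c' hc'
        rw [hh] at this; exact lt_irrefl _ this
      rw [List.filter_congr (fun t ht => hfe t ht c'),
        List.filter_congr (fun t ht => hfe t (hBsub.mem ht) c')]
      conv_lhs => rw [hsplit]
      rw [List.filter_append, List.filter_eq_nil_iff.mpr
        (fun t ht => by simp only [hA t ht, beq_iff_eq]; exact hcne), List.nil_append]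
    have hblocksB : pvBlocksG k f D L cs = pvBlocksG k f D B cs :=
      pv_blocks_congr k f D cs L B hfilterrest
    have ihB : ∀ cur' : String, (∀ c' ∈ cs, cur' ≠ String.ofList [c']) →
        pvEmitG k f (fun t => "\n-- " ++ k t ++ " " ++ D) cur' B = pvBlocksG k f D B cs := by
      intro cur' hcur'
      exact ih B cur' (fun t ht => hk t (hBsub.mem ht))
        (fun t ht => (hB t ht).2) (hmono.sublist hBsub)
        (List.pairwise_cons.mp hcs).2 hcur'
    simp only [pvBlocksG, hfilterc]
    cases hAc : A with
    | nil =>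
      have hLB : L = B := by rw [hsplit, hAc, List.nil_append]
      simp only [List.isEmpty_nil, if_true, List.nil_append]
      rw [hblocksB]
      conv_lhs => rw [hLB]
      exact ihB cur (fun c' hc' => hcur c' (by simp [hc']))
    | cons t0 A' =>
      have ht0A : t0 ∈ A := by rw [hAc]; simp
      have ht0L : t0 ∈ L := hAsub.mem ht0A
      have hkt0 : k t0 = String.ofList [c] := by rw [hk t0 ht0L, hA t0 ht0A]
      have hne : k t0 != cur := by
        rw [bne_iff_ne, hkt0]
        exact fun hh => hcur c (by simp) hh.symm
      conv_lhs => rw [hsplit, hAc]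
      simp only [List.cons_append, pvEmitG, hne, if_pos, List.nil_append]
      rw [pv_emit_run k f _ A' B (k t0)
        (fun t ht => by rw [hk t (hAsub.mem (by rw [hAc]; simp [ht])), hA t (by rw [hAc]; simp [ht]), ← hkt0])]
      rw [hkt0]
      rw [ihB (String.ofList [c]) (fun c' hc' => by
        intro hh
        have := pv_ofList_single_inj hh
        have hlt := (List.pairwise_cons.mp hcs).1 c' hc'
        rw [this] at hlt; exact lt_irrefl _ hlt)]
      rw [hblocksB]
      simp


theorem pv_bfold {ν : Type} (k f : String → String) (D : String) (g : String × ν → String)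
    (P : List (String × ν)) (hg : ∀ p ∈ P, g p = f p.1) :
    ∀ (cs : List Char) (out : List String),
      List.foldl (fun out c =>
        if !(P.filter (fun p => k p.1 == String.ofList [c])).isEmpty then
          (out ++ ["\n-- " ++ String.ofList [c] ++ " " ++ D]) ++
            (P.filter (fun p => k p.1 == String.ofList [c])).map g
        else out) out cs
      = out ++ pvBlocksG k f D (P.map (fun p => p.1)) cs := by
  intro cs
  induction cs with
  | nil => intro out; simp [pvBlocksG]
  | cons c cs ih =>
    intro out
    have hf : (P.map (fun p => p.1)).filter (fun t => k t == String.ofList [c]) =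
        (P.filter (fun p => k p.1 == String.ofList [c])).map (fun p => p.1) := by
      rw [List.filter_map]
      rfl
    have hmapg : ((P.filter (fun p => k p.1 == String.ofList [c])).map (fun p => p.1)).map f =
        (P.filter (fun p => k p.1 == String.ofList [c])).map g := by
      rw [List.map_map]
      exact (List.map_congr_left (fun p hp => (hg p (List.mem_of_mem_filter hp)).symm))
    simp only [List.foldl_cons, pvBlocksG, hf]
    by_cases he : (P.filter (fun p => k p.1 == String.ofList [c])).isEmpty
    · simp only [Bool.not_true, Bool.false_eq_true, if_false, List.isEmpty_map, he, if_true]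
      rw [ih out]
      simp
    · have he' : (P.filter (fun p => k p.1 == String.ofList [c])).isEmpty = false := by
        simpa using he
      simp only [he', Bool.not_false, if_true, List.isEmpty_map, Bool.false_eq_true, if_false]
      rw [ih]
      rw [hmapg]
      simp [List.append_assoc]


theorem pv_ofList_eq_mk {κ ν : Type} [BEq κ] [LawfulBEq κ] (l : List (κ × ν))
    (h : (l.map (fun p => p.1)).Nodup) : PySem.Dict.ofList l = PySem.Dict.mk l :=
  PySem.Dict.ext (by rw [pv_items_ofList l h])

theorem pv_plain_section (l : List (String × List (Int × List Int)))
    (hkeys : (l.map (fun p => p.1)).Nodup)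
    (hrefs : ∀ p ∈ l, (p.2.map (fun q => q.1)).Nodup) :
    (PySem.List.sorted (l.map (fun p => p.1)) (fun t => t)).map
      (fun term => "  " ++ term ++ " > " ++ pvFormatRefsA ((PySem.Dict.mk l).getD term []))
    = (PySem.List.sorted l (fun p => p.1)).map (fun p => pvEntryLineB p.1 p.2) := by
  rw [pv_map_sorted_keys l (fun t => t) (fun t r => "  " ++ t ++ " > " ++ pvFormatRefsA r) [] hkeys]
  refine List.map_congr_left (fun p hp => ?_)
  have hm : p ∈ l := (PySem.List.mem_sorted _ _ _ _).mp hp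
  show "  " ++ p.1 ++ " > " ++ pvFormatRefsA p.2 = pvEntryLineB p.1 p.2
  unfold pvEntryLineB
  rw [pv_format_refs_eq p.2 (hrefs p hm)]

theorem pv_alpha_section (f : String → String) (D : String) (FA : List (String × List (Int × List Int)))
    (hpred : ∀ p ∈ FA, (p.1 != "" && pvAlphaHeadA p.1) = true) :
    pvEmitG (fun t => PySem.Str.upper (String.ofList (PySem.Str.pyGet? t 0).toList)) f
        (fun t => "\n-- " ++ PySem.Str.upper (String.ofList (PySem.Str.pyGet? t 0).toList) ++ " " ++ D) ""
        (PySem.List.sorted (FA.map (fun p => p.1)) (fun t => PySem.Str.lower t))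
      = pvBlocksG (fun t => PySem.Str.upper (String.ofList (PySem.Str.pyGet? t 0).toList)) f D
        ((PySem.List.sorted FA (fun p => PySem.Str.lower p.1)).map (fun p => p.1))
        ("ABCDEFGHIJKLMNOPQRSTUVWXYZ").toList := by
  rw [pv_sorted_map_comm (fun p => p.1) (fun t => PySem.Str.lower t) FA]
  have hLmem : ∀ t ∈ (PySem.List.sorted FA (fun p => PySem.Str.lower p.1)).map (fun p => p.1),
      ∃ c cs, t.toList = c :: cs ∧ PySem.Chars.isalpha c = true := by
    intro t ht
    obtain ⟨p, hp, rfl⟩ := List.mem_map.mp ht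
    exact pv_alpha_head p.1 (hpred p ((PySem.List.mem_sorted _ _ _ _).mp hp))
  apply pv_emit_blocks _ f D pvKC
  · intro t ht
    obtain ⟨c, cs, htl, hal⟩ := hLmem t ht
    obtain ⟨h1, h2⟩ := pv_firstUpper_eq t c cs htl
    rw [h1, h2]
  · intro t ht
    obtain ⟨c, cs, htl, hal⟩ := hLmem t ht
    rw [(pv_firstUpper_eq t c cs htl).2]
    exact pv_upper_mem c hal
  · rw [List.pairwise_map]
    refine (PySem.List.sorted_pairwise FA (fun p => PySem.Str.lower p.1)).imp_of_mem ?_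
    intro a b ha hb hle
    obtain ⟨c1, cs1, htl1, hal1⟩ := pv_alpha_head a.1 (hpred a ((PySem.List.mem_sorted _ _ _ _).mp ha))
    obtain ⟨c2, cs2, htl2, hal2⟩ := pv_alpha_head b.1 (hpred b ((PySem.List.mem_sorted _ _ _ _).mp hb))
    rw [(pv_firstUpper_eq a.1 c1 cs1 htl1).2, (pv_firstUpper_eq b.1 c2 cs2 htl2).2]
    exact pv_upper_mono c1 c2 hal1 hal2 (pv_lower_head_le a.1 b.1 c1 c2 cs1 cs2 htl1 htl2 hle)
  · decide
  · intro c _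
    exact pv_empty_ne_single c

-- ===== VERDICT (by name: the statement is the Claim_ definition above) =====
theorem build_output_spec : Claim_equal_build_output := by
  unfold Claim_equal_build_output
  intro entries code_entries hdom hpre
  obtain ⟨hek, hck, her, hcr⟩ := hpre
  unfold Spec_build_output build_output build_output_alt
  dsimp only
  refine congrArg (PySem.Str.join "\n") ?_
  -- abbreviations and nodup facts
  have hFAn : ((entries.filter (fun p => p.1 != "" && pvAlphaHeadA p.1)).map (fun p => p.1)).Nodup :=
    hek.sublist (List.Sublist.map (fun (p : String × List (Int × List Int)) => p.1)
      (List.filter_sublist (p := fun p => p.1 != "" && pvAlphaHeadA p.1) (l := entries)))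
  have hFOn : ((entries.filter (fun p => p.1 != "" && !pvAlphaHeadA p.1)).map (fun p => p.1)).Nodup :=
    hek.sublist (List.Sublist.map (fun (p : String × List (Int × List Int)) => p.1)
      (List.filter_sublist (p := fun p => p.1 != "" && !pvAlphaHeadA p.1) (l := entries)))
  -- align B's double filters with A's single filters
  rw [List.filter_filter, List.filter_filter]
  rw [List.filter_congr (fun (p : String × List (Int × List Int)) (_ : p ∈ entries) => Bool.and_comm (pvAlphaHeadA p.1) (p.1 != "")),
      List.filter_congr (fun (p : String × List (Int × List Int)) (_ : p ∈ entries) => Bool.and_comm (!pvAlphaHeadA p.1) (p.1 != ""))]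
  -- dictionaries are plain association lists under Pre_
  rw [pv_ofList_eq_mk _ hFAn, pv_ofList_eq_mk _ hFOn]
  have hkFA : (PySem.Dict.mk (entries.filter (fun p => p.1 != "" && pvAlphaHeadA p.1))).keys
      = (entries.filter (fun p => p.1 != "" && pvAlphaHeadA p.1)).map (fun p => p.1) := rfl
  have hkFO : (PySem.Dict.mk (entries.filter (fun p => p.1 != "" && !pvAlphaHeadA p.1))).keys
      = (entries.filter (fun p => p.1 != "" && !pvAlphaHeadA p.1)).map (fun p => p.1) := rfl
  have hsz : (PySem.Dict.mk (entries.filter (fun p => p.1 != "" && !pvAlphaHeadA p.1))).size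
      = (entries.filter (fun p => p.1 != "" && !pvAlphaHeadA p.1)).length := rfl
  rw [hkFA, hkFO, hsz]
  rw [pv_scan (fun term => PySem.Str.upper (String.ofList (PySem.Str.pyGet? term 0).toList))
      (fun term => "  " ++ term ++ " > " ++ pvFormatRefsA ((PySem.Dict.mk (entries.filter (fun p => p.1 != "" && pvAlphaHeadA p.1))).getD term []))
      (fun term => "\n-- " ++ PySem.Str.upper (String.ofList (PySem.Str.pyGet? term 0).toList) ++ " " ++ String.ofList (List.replicate 74 '-'))
      (PySem.List.sorted ((entries.filter (fun p => p.1 != "" && pvAlphaHeadA p.1)).map (fun p => p.1)) (fun t => PySem.Str.lower t)) ""]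
  rw [pv_alpha_section
      (fun term => "  " ++ term ++ " > " ++ pvFormatRefsA ((PySem.Dict.mk (entries.filter (fun p => p.1 != "" && pvAlphaHeadA p.1))).getD term []))
      (String.ofList (List.replicate 74 '-'))
      (entries.filter (fun p => p.1 != "" && pvAlphaHeadA p.1))
      (fun p hp => (List.mem_filter.mp hp).2)]
  rw [PySem.List.foldl_append_singleton_eq_map, PySem.List.foldl_append_singleton_eq_map]
  rw [pv_plain_section (entries.filter (fun p => p.1 != "" && !pvAlphaHeadA p.1)) hFOn
      (fun p hp => her p (List.mem_of_mem_filter hp)),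
    pv_plain_section code_entries hck hcr]
  simp only [pvFirstUpperB]
  rw [pv_bfold (fun t => PySem.Str.upper (String.ofList (PySem.Str.pyGet? t 0).toList))
      (fun term => "  " ++ term ++ " > " ++ pvFormatRefsA ((PySem.Dict.mk (entries.filter (fun p => p.1 != "" && pvAlphaHeadA p.1))).getD term []))
      (String.ofList (List.replicate 74 '-'))
      (fun p => pvEntryLineB p.1 p.2)
      (PySem.List.sorted (entries.filter (fun p => p.1 != "" && pvAlphaHeadA p.1)) (fun p => PySem.Str.lower p.1))
      (fun p hp => by
        have hm : p ∈ entries.filter (fun p => p.1 != "" && pvAlphaHeadA p.1) := (PySem.List.mem_sorted _ _ _ _).mp hp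
        unfold pvEntryLineB
        dsimp only
        rw [pv_getD_mk _ p hm hFAn [], pv_format_refs_eq p.2 (her p (List.mem_of_mem_filter hm))])]
  have hcond1 : ∀ {α : Type} (l : List α), (l.length != 0) = !l.isEmpty := by
    intro α l; cases l <;> rfl
  have hcond2 : (PySem.List.sorted (entries.filter (fun p => p.1 != "" && !pvAlphaHeadA p.1)) (fun p => p.1)).isEmpty
      = (entries.filter (fun p => p.1 != "" && !pvAlphaHeadA p.1)).isEmpty := by
    by_cases h : (entries.filter (fun p => p.1 != "" && !pvAlphaHeadA p.1)) = []
    · rw [h]; rfl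
    · have h1 : PySem.List.sorted (entries.filter (fun p => p.1 != "" && !pvAlphaHeadA p.1)) (fun p => p.1) ≠ [] :=
        fun hh => h ((PySem.List.sorted_eq_nil_iff _ _ _).mp hh)
      rw [List.isEmpty_eq_false_iff.mpr h1, List.isEmpty_eq_false_iff.mpr h]
  rw [hcond1, hcond1, hcond2]
  simp only [List.nil_append, List.append_assoc, List.cons_append]
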